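-- pv_equiv track=rewrite | github.com/tbohne/nesy_diag_bench | nesy_diag_bench/instance_gen.py | generate_ground_truth_fault_paths
-- ===== SOURCE A (Python) =====
-- from collections import defaultdict
-- from typing import Dict, Tuple, List
--
-- def find_paths_dfs(anomaly_graph: Dict[str, List[str]], node: str, path: List[str] = []) -> List[List[str]]:
--     """
--     Finds paths in the anomaly graph in a depth-first fashion.
--
--     :param anomaly_graph: anomaly graph to find paths in
--     :param node: currently considered node (e.g., path source)
--     :param path: currently considered path
--     :return: list of found paths
--     """
--     if node in path:  # deal with cyclic relations
--         return [path]
--     path = path + [node]  # not using append() because it wouldn't create a new list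
--     if node not in anomaly_graph:
--         return [path]
--     paths = []
--     for node in anomaly_graph[node]:
--         paths.extend(find_paths_dfs(anomaly_graph, node, path))
--     return paths
--
-- def find_all_longest_paths(anomaly_graph: Dict[str, List[str]]) -> List[List[str]]:
--     """
--     Finds all longest paths in the anomaly graph.
--
--     :param anomaly_graph: anomaly graph to find longest paths in
--     :return: unique longest paths
--     """
--     all_paths = []
--     for path_src in anomaly_graph:
--         all_paths.extend(find_paths_dfs(anomaly_graph, path_src))
--     return find_unique_longest_paths(all_paths)
--
-- def find_unique_longest_paths(paths: List[List[str]]) -> List[List[str]]: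
--     """
--     Extracts the unique longest paths from the list of identified paths.
--
--     :param paths: identified paths to find unique longest paths in
--     :return: unique longest paths
--     """
--     unique_paths = []
--     paths_sorted = sorted(paths, key=len, reverse=True)
--     for path in paths_sorted:
--         if not any("-" + "-".join(list(path)) + "-" in "-" + "-".join(up) + "-" for up in unique_paths):
--             unique_paths.append(list(path))
--     return unique_paths
--
-- def generate_ground_truth_fault_paths(component_net: Dict[str, Tuple[bool, List[str]]]) -> List[List[str]]:
--     """
--     Generates the ground truth fault paths based on the component network.
--
--     :param component_net: component network, i.e., mapping of components to states and affected-by relations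
--     :return: ground truth fault paths
--     """
--     anomalous_components = [k for k in component_net.keys() if component_net[k][0]]
--
--     # finding all anomalous affecting components for all anomalous components,
--     # those are the edges in the final fault paths
--     edges = []
--     for anomaly in anomalous_components:
--         for aff_by in component_net[anomaly][1]:
--             if aff_by in anomalous_components:
--                 edges.append(aff_by + " -> " + anomaly)
--
--     edges = edges[::-1]  # has to be reversed, affected-by direction
--     # create adjacency lists
--     anomaly_graph = defaultdict(list)
--     for edge in edges:
--         start, end = edge.split(' -> ')
--         anomaly_graph[start].append(end)
--
--     fault_paths = find_all_longest_paths(anomaly_graph)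
--
--     # handle one-component-paths
--     for anomaly in anomalous_components:
--         edge_comp = "-" + "-".join(["-".join(edge.split(" -> ")) for edge in edges]) + "-"
--         if "-" + anomaly + "-" not in edge_comp:
--             fault_paths.append([anomaly])
--     return fault_paths
-- ===== SOURCE B (Python) =====
-- def generate_ground_truth_fault_paths(component_net):
--     """
--     Generates the ground truth fault paths based on the component network.
--     Same result as the original, via an accumulator DFS that emits paths
--     back-to-front, cached dedup marks, and a hoisted edge string.
--     """
--     anomalous = [k for k, v in component_net.items() if v[0]]
--     edges = [aff + " -> " + k
--              for k in anomalous
--              for aff in component_net[k][1]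
--              if aff in anomalous][::-1]
--     graph = {}
--     for edge in edges:
--         start, end = edge.split(" -> ")
--         graph.setdefault(start, []).append(end)
--
--     def dfs(node, path, acc):
--         # prepends all completed paths rooted at (node, path) onto acc
--         if node in path:  # cyclic relation
--             return [path] + acc
--         path = path + [node]
--         succs = graph.get(node)
--         if succs is None:
--             return [path] + acc
--         for nxt in reversed(succs):
--             acc = dfs(nxt, path, acc)
--         return acc
--
--     all_paths = []
--     for src in reversed(list(graph)):
--         all_paths = dfs(src, [], all_paths)
--
--     fault_paths, marks = [], []
--     for path in sorted(all_paths, key=len, reverse=True):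
--         mark = "-" + "-".join(path) + "-"
--         if not any(mark in m for m in marks):
--             fault_paths.append(list(path))
--             marks.append(mark)
--
--     edge_comp = "-" + "-".join("-".join(e.split(" -> ")) for e in edges) + "-"
--     for anomaly in anomalous:
--         if "-" + anomaly + "-" not in edge_comp:
--             fault_paths.append([anomaly])
--     return fault_paths
-- ===== Notes on version B (the rewrite author's own statement) =====
-- stated objective: alternative
-- what changed: The recursive extend-and-concatenate DFS per source is replaced by an accumulator DFS that prepends completed paths back-to-front (sources and successors visited in reverse), the dedup loop caches each accepted path's '-'-joined mark instead of re-joining every kept path on every test, and the constant edge_comp string is hoisted out of the singleton loop instead of being rebuilt per anomaly.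
import Mathlib
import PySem

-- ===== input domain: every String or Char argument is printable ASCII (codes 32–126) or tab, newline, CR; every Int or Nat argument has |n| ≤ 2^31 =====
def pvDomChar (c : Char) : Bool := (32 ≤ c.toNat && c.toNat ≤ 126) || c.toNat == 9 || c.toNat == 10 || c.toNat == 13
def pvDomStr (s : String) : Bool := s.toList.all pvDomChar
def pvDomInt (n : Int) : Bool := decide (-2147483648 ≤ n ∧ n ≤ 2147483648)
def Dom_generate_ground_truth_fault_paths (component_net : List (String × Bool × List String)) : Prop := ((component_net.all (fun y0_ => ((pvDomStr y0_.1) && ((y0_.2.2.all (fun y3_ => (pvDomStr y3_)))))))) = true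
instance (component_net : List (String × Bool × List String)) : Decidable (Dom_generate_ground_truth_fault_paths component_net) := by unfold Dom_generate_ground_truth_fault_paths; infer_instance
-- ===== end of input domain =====

-- B re-decomposes A: accumulator DFS emitting paths back-to-front, dedup marks cached,
-- edge_comp hoisted out of the singleton loop; return value proved equal on Pre_.

-- the filtered-key count drops when an unvisited graph key is appended to the path
theorem pv_filter_contains_lt (keys path : List String) (node : String)
    (h1 : path.contains node = false) (h2 : node ∈ keys) :
    (keys.filter (fun k => !(path ++ [node]).contains k)).length
      < (keys.filter (fun k => !path.contains k)).length := by
  have hrw : keys.filter (fun k => !(path ++ [node]).contains k)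
      = (keys.filter (fun k => !path.contains k)).filter (fun k => !(path ++ [node]).contains k) := by
    rw [List.filter_filter]
    apply List.filter_congr
    intro a _
    cases hq : (path ++ [node]).contains a with
    | true => simp
    | false =>
      have hnp : a ∉ path := by
        have h := hq
        simp at h
        exact h.1
      simp [hnp]
  rw [hrw]
  apply List.length_filter_lt_length_iff_exists.2
  refine ⟨node, ?_, ?_⟩
  · have hnp : node ∉ path := by simpa using h1
    simp [List.mem_filter, h2, hnp]
  · simp

-- ===== PORT A =====
-- termination measure for A's DFS: graph keys not yet on the path
def pvMeasureA (g : PySem.Dict String (List String)) (path : List String) : Nat :=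
  (g.keys.filter (fun k => !path.contains k)).length

theorem pvMeasureA_lt (g : PySem.Dict String (List String)) (path : List String) (node : String)
    (h1 : path.contains node = false) (h2 : node ∈ g.keys) :
    pvMeasureA g (path ++ [node]) < pvMeasureA g path :=
  pv_filter_contains_lt g.keys path node h1 h2

-- find_paths_dfs
def findPathsDfs (g : PySem.Dict String (List String)) (node : String) (path : List String) :
    List (List String) :=
  if _h1 : path.contains node then [path]  -- deal with cyclic relations
  else
    let path' := path ++ [node]
    if _h2 : g.contains node then
      -- for node in anomaly_graph[node]: paths.extend(find_paths_dfs(anomaly_graph, node, path))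
      (g.getD node []).foldl (fun paths n => paths ++ findPathsDfs g n path') []
    else [path']
termination_by pvMeasureA g path
decreasing_by
  exact pvMeasureA_lt g path node (by simpa using _h1)
    ((PySem.Dict.contains_iff_mem_keys g node).1 _h2)

-- find_unique_longest_paths
def findUniqueLongestPaths (paths : List (List String)) : List (List String) :=
  let pathsSorted := PySem.List.sorted paths (fun p => p.length) true
  pathsSorted.foldl (fun uniquePaths path =>
    if uniquePaths.any (fun up =>
        PySem.Str.isIn ("-" ++ PySem.Str.join "-" path ++ "-") ("-" ++ PySem.Str.join "-" up ++ "-")) then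
      uniquePaths
    else uniquePaths ++ [path]) []

-- find_all_longest_paths
def findAllLongestPaths (g : PySem.Dict String (List String)) : List (List String) :=
  findUniqueLongestPaths (g.keys.foldl (fun acc src => acc ++ findPathsDfs g src []) [])

def generate_ground_truth_fault_paths (component_net : List (String × Bool × List String)) :
    List (List String) :=
  let d := PySem.Dict.ofList component_net
  let anomalous := d.keys.filter (fun k => (d.getD k (false, [])).1)
  let edges := anomalous.foldl (fun acc anomaly =>
      (d.getD anomaly (false, [])).2.foldl (fun acc2 affBy =>
        if anomalous.contains affBy then acc2 ++ [affBy ++ " -> " ++ anomaly] else acc2) acc) []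
  let edges := edges.reverse  -- edges[::-1]
  let graph := edges.foldl (fun g edge =>
      -- start, end = edge.split(' -> '); anomaly_graph[start].append(end)  (defaultdict(list))
      match (PySem.Str.split? edge " -> ").getD [] with
      | [s, e] => g.modify s [] (fun l => l ++ [e])
      | _ => g)  -- ≠ 2 parts: Python raises ValueError here (excluded by Pre_)
    PySem.Dict.empty
  let faultPaths := findAllLongestPaths graph
  -- handle one-component-paths
  anomalous.foldl (fun fps anomaly =>
    let edgeComp := "-" ++ PySem.Str.join "-"
      (edges.map (fun e => PySem.Str.join "-" ((PySem.Str.split? e " -> ").getD []))) ++ "-"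
    if PySem.Str.isIn ("-" ++ anomaly ++ "-") edgeComp then fps else fps ++ [[anomaly]]) faultPaths

-- ===== PORT B =====
-- termination measure for B's DFS: graph keys not yet on the path
def pvMeasureB (g : PySem.Dict String (List String)) (path : List String) : Nat :=
  g.keys.countP (fun k => !path.contains k)

theorem pvMeasureB_lt (g : PySem.Dict String (List String)) (path : List String) (node : String)
    (h1 : path.contains node = false) (h2 : node ∈ g.keys) :
    pvMeasureB g (path ++ [node]) < pvMeasureB g path := by
  unfold pvMeasureB
  rw [List.countP_eq_length_filter, List.countP_eq_length_filter]
  exact pv_filter_contains_lt g.keys path node h1 h2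

-- dfs(node, path, acc): prepends all completed paths rooted at (node, path) onto acc
def altDfs (g : PySem.Dict String (List String)) (node : String) (path : List String)
    (acc : List (List String)) : List (List String) :=
  if _h1 : path.contains node then path :: acc
  else
    let path' := path ++ [node]
    match _h2 : g.get? node with
    | none => path' :: acc
    | some succs => succs.reverse.foldl (fun a nxt => altDfs g nxt path' a) acc
termination_by pvMeasureB g path
decreasing_by
  refine pvMeasureB_lt g path node (by simpa using _h1) ?_
  have : g.contains node = true := by
    rw [PySem.Dict.contains_eq_isSome_get?, _h2]; rfl
  exact (PySem.Dict.contains_iff_mem_keys g node).1 this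

def generate_ground_truth_fault_paths_alt (component_net : List (String × Bool × List String)) :
    List (List String) :=
  let d := PySem.Dict.ofList component_net
  let anomalous := (d.items.filter (fun p => p.2.1)).map (fun p => p.1)
  let edges := (anomalous.flatMap (fun k =>
      ((d.getD k (false, [])).2.filter (fun aff => anomalous.contains aff)).map
        (fun aff => aff ++ " -> " ++ k))).reverse
  let graph := edges.foldl (fun g edge =>
      -- start, end = edge.split(" -> "): the two parts by position;
      -- graph.setdefault(start, []).append(end): net effect on the dict is modify
      let parts := (PySem.Str.split? edge " -> ").getD []
      if parts.length == 2 then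
        g.modify (parts.getD 0 "") [] (fun l => l ++ [parts.getD 1 ""])
      else g)  -- ≠ 2 parts: Python raises ValueError here (excluded by Pre_)
    PySem.Dict.empty
  let allPaths := graph.keys.reverse.foldl (fun acc src => altDfs graph src [] acc) []
  let dedup := (PySem.List.sorted allPaths (fun p => p.length) true).foldl
    (fun (st : List (List String) × List String) path =>
      let mark := "-" ++ PySem.Str.join "-" path ++ "-"
      if st.2.any (fun m => PySem.Str.isIn mark m) then st
      else (st.1 ++ [path], st.2 ++ [mark])) ([], [])
  let edgeComp := "-" ++ PySem.Str.join "-"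
    (edges.map (fun e => PySem.Str.join "-" ((PySem.Str.split? e " -> ").getD []))) ++ "-"
  anomalous.foldl (fun fps anomaly =>
    if PySem.Str.isIn ("-" ++ anomaly ++ "-") edgeComp then fps else fps ++ [[anomaly]]) dedup.1

-- ===== PRECONDITION & SPEC =====
-- Pre_ excludes exactly the inputs where A's "start, end = edge.split(' -> ')" raises
-- ValueError: some generated edge string "aff -> comp" between anomalous components does
-- not split back into exactly two parts (an endpoint name contains or composes " -> ").
def Pre_generate_ground_truth_fault_paths (component_net : List (String × Bool × List String)) : Prop :=
  ∀ p ∈ (PySem.Dict.ofList component_net).items, p.2.1 = true →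
    ∀ a ∈ p.2.2,
      ((((PySem.Dict.ofList component_net).get? a).map Prod.fst).getD false) = true →
      ((PySem.Str.split? (a ++ " -> " ++ p.1) " -> ").getD []).length = 2

instance (component_net : List (String × Bool × List String)) :
    Decidable (Pre_generate_ground_truth_fault_paths component_net) := by
  unfold Pre_generate_ground_truth_fault_paths; infer_instance

def pvWitness_generate_ground_truth_fault_paths : (List (String × Bool × List String)) :=
  [("a", true, ["b"]), ("b", true, ["b", "c"]), ("c", false, [])]

def Spec_generate_ground_truth_fault_paths (component_net : List (String × Bool × List String))
    (out : List (List String)) : Prop :=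
  out = generate_ground_truth_fault_paths_alt component_net

instance (component_net : List (String × Bool × List String)) (out : List (List String)) :
    Decidable (Spec_generate_ground_truth_fault_paths component_net out) := by
  unfold Spec_generate_ground_truth_fault_paths; infer_instance

-- ===== CLAIM (what is proved, stated in full; the proofs are below) =====
def Claim_equal_generate_ground_truth_fault_paths : Prop :=
  ∀ (component_net : List (String × Bool × List String)),
    Dom_generate_ground_truth_fault_paths component_net →
    Pre_generate_ground_truth_fault_paths component_net →
    Spec_generate_ground_truth_fault_paths component_net
      (generate_ground_truth_fault_paths component_net)

-- ===== LEMMAS AND PROOFS =====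

theorem flatrev {α β : Type} (f : α → List β) (l : List α) (acc : List β) :
    l.reverse.foldl (fun a x => f x ++ a) acc = l.flatMap f ++ acc := by
  rw [List.foldl_reverse]
  induction l with
  | nil => simp
  | cons x t ih => simp [ih]

theorem altDfs_eq_aux (g : PySem.Dict String (List String)) :
    ∀ (N : Nat) (path : List String), pvMeasureB g path ≤ N →
      ∀ (node : String) (acc : List (List String)),
        altDfs g node path acc = findPathsDfs g node path ++ acc := by
  intro N
  induction N with
  | zero =>
    intro path hle node acc
    rw [altDfs.eq_def, findPathsDfs.eq_def]
    by_cases h1 : path.contains node = true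
    · have hmem : node ∈ path := by simpa using h1
      simp [hmem]
    · have hnp : node ∉ path := by simpa using h1
      cases h2 : g.get? node with
      | none =>
        have hc : g.contains node = false := by
          rw [PySem.Dict.contains_eq_isSome_get?, h2]; rfl
        simp [hc, hnp]
      | some succs =>
        have hc : g.contains node = true := by
          rw [PySem.Dict.contains_eq_isSome_get?, h2]; rfl
        have hmem : node ∈ g.keys := (PySem.Dict.contains_iff_mem_keys g node).1 hc
        have hlt := pvMeasureB_lt g path node (by simpa using h1) hmem
        omega
  | succ N ih =>
    intro path hle node acc
    rw [altDfs.eq_def, findPathsDfs.eq_def]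
    by_cases h1 : path.contains node = true
    · have hmem : node ∈ path := by simpa using h1
      simp [hmem]
    · have hnp : node ∉ path := by simpa using h1
      cases h2 : g.get? node with
      | none =>
        have hc : g.contains node = false := by
          rw [PySem.Dict.contains_eq_isSome_get?, h2]; rfl
        simp [hc, hnp]
      | some succs =>
        have hc : g.contains node = true := by
          rw [PySem.Dict.contains_eq_isSome_get?, h2]; rfl
        have hmem : node ∈ g.keys := (PySem.Dict.contains_iff_mem_keys g node).1 hc
        have hlt := pvMeasureB_lt g path node (by simpa using h1) hmem
        have hle' : pvMeasureB g (path ++ [node]) ≤ N := by omega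
        have hgd : g.getD node [] = succs := PySem.Dict.getD_of_get?_eq_some g [] h2
        simp only [hc, hgd]
        rw [PySem.List.foldl_congr_mem succs.reverse _
              (fun a n => findPathsDfs g n (path ++ [node]) ++ a) acc
              (by intro a n hn; exact ih (path ++ [node]) hle' n a)]
        rw [flatrev, PySem.List.foldl_append_eq_flatMap]
        simp [hnp]

theorem altDfs_eq (g : PySem.Dict String (List String)) (node : String) (path : List String)
    (acc : List (List String)) : altDfs g node path acc = findPathsDfs g node path ++ acc :=
  altDfs_eq_aux g (pvMeasureB g path) path le_rfl node acc

-- the dedup loop of B carries (accepted paths, their marks); its first component is A's loop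
theorem anom_eq (d : PySem.Dict String (Bool × List String)) (h : d.keys.Nodup) :
    (d.items.filter (fun p => p.2.1)).map (fun p => p.1)
      = d.keys.filter (fun k => (d.getD k (false, ([] : List String))).1) := by
  have hk : d.keys = d.items.map Prod.fst := rfl
  rw [hk, List.filter_map]
  apply congrArg
  apply List.filter_congr
  intro p hp
  have := PySem.Dict.getD_of_mem_items d (k := p.1) (v := p.2) (by simpa using hp) h
    (false, ([] : List String))
  simp [Function.comp, this]

theorem edges_eq (d : PySem.Dict String (Bool × List String)) (anomalous : List String) :
    anomalous.flatMap (fun k =>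
        ((d.getD k (false, [])).2.filter (fun aff => anomalous.contains aff)).map
          (fun aff => aff ++ " -> " ++ k))
      = anomalous.foldl (fun acc anomaly =>
          (d.getD anomaly (false, [])).2.foldl (fun acc2 affBy =>
            if anomalous.contains affBy then acc2 ++ [affBy ++ " -> " ++ anomaly] else acc2) acc) [] := by
  rw [PySem.List.foldl_congr_mem anomalous _
        (fun acc anomaly => acc ++ ((d.getD anomaly (false, [])).2.filter
          (fun aff => anomalous.contains aff)).map (fun aff => aff ++ " -> " ++ anomaly)) []
        (by
          intro acc x hx
          rw [PySem.List.foldl_append_if (fun aff => anomalous.contains aff)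
                (fun affBy => affBy ++ " -> " ++ x)])]
  rw [PySem.List.foldl_append_eq_flatMap]
  simp

theorem allpaths_eq (g : PySem.Dict String (List String)) :
    g.keys.reverse.foldl (fun acc src => altDfs g src [] acc) []
      = g.keys.foldl (fun acc src => acc ++ findPathsDfs g src []) [] := by
  rw [PySem.List.foldl_congr_mem g.keys.reverse _
        (fun acc src => findPathsDfs g src [] ++ acc) []
        (by intro acc x _; exact altDfs_eq g x [] acc)]
  rw [flatrev, PySem.List.foldl_append_eq_flatMap]
  simp

theorem dedup_eq (l : List (List String)) :
    ∀ u : List (List String),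
      (l.foldl (fun (st : List (List String) × List String) path =>
        let mark := "-" ++ PySem.Str.join "-" path ++ "-"
        if st.2.any (fun m => PySem.Str.isIn mark m) then st
        else (st.1 ++ [path], st.2 ++ [mark]))
        (u, u.map (fun p => "-" ++ PySem.Str.join "-" p ++ "-"))).1
      = l.foldl (fun ups path =>
          if ups.any (fun up =>
              PySem.Str.isIn ("-" ++ PySem.Str.join "-" path ++ "-")
                ("-" ++ PySem.Str.join "-" up ++ "-")) then ups
          else ups ++ [path]) u := by
  induction l with
  | nil => intro u; simp
  | cons x t ih =>
    intro u
    simp only [List.foldl_cons]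
    by_cases hc : u.any (fun up =>
        PySem.Str.isIn ("-" ++ PySem.Str.join "-" x ++ "-")
          ("-" ++ PySem.Str.join "-" up ++ "-")) = true
    · have hb : (u.map (fun p => "-" ++ PySem.Str.join "-" p ++ "-")).any
          (fun m => PySem.Str.isIn ("-" ++ PySem.Str.join "-" x ++ "-") m) = true := by
        rw [List.any_map]; exact hc
      simp only [hb, hc, if_true]
      exact ih u
    · have hb : (u.map (fun p => "-" ++ PySem.Str.join "-" p ++ "-")).any
          (fun m => PySem.Str.isIn ("-" ++ PySem.Str.join "-" x ++ "-") m) = false := by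
        rw [List.any_map]; simpa using hc
      simp only [hb, hc, if_false, Bool.false_eq_true]
      have h2 := ih (u ++ [x])
      rw [List.map_append] at h2
      simpa using h2

theorem graphfold_eq (edges : List String) :
    edges.foldl (fun g edge =>
        let parts := (PySem.Str.split? edge " -> ").getD []
        if parts.length == 2 then
          g.modify (parts.getD 0 "") [] (fun l => l ++ [parts.getD 1 ""])
        else g) (PySem.Dict.empty : PySem.Dict String (List String))
      = edges.foldl (fun g edge =>
          match (PySem.Str.split? edge " -> ").getD [] with
          | [s, e] => g.modify s [] (fun l => l ++ [e])
          | _ => g) PySem.Dict.empty := by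
  apply PySem.List.foldl_congr_mem
  intro g edge _
  cases h : (PySem.Str.split? edge " -> ").getD [] with
  | nil => simp
  | cons s t =>
    cases t with
    | nil => simp
    | cons e r =>
      cases r with
      | nil => simp
      | cons a b => simp

theorem generate_ground_truth_fault_paths_spec :
    Claim_equal_generate_ground_truth_fault_paths := by
  intro net _hdom _hpre
  unfold Spec_generate_ground_truth_fault_paths
  have hnodup : (PySem.Dict.ofList net).keys.Nodup := PySem.Dict.nodup_keys_ofList net
  simp only [generate_ground_truth_fault_paths, generate_ground_truth_fault_paths_alt,
    findAllLongestPaths, findUniqueLongestPaths]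
  rw [anom_eq _ hnodup, edges_eq, graphfold_eq, allpaths_eq]
  congr 2
  exact (dedup_eq _ []).symm
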